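-- pv_equiv track=rewrite | github.com/bloomberg/chromium.bb | mojo/public/bindings/parse/mojo_translate.py | MapKind
-- ===== SOURCE A (Python) =====
-- def MapKind(kind):
--   map_to_kind = { 'bool': 'b',
--                   'int8': 'i8',
--                   'int16': 'i16',
--                   'int32': 'i32',
--                   'int64': 'i64',
--                   'uint8': 'u8',
--                   'uint16': 'u16',
--                   'uint32': 'u32',
--                   'uint64': 'u64',
--                   'float': 'f',
--                   'double': 'd',
--                   'string': 's',
--                   'handle': 'h',
--                   'handle<data_pipe_consumer>': 'h:d:c',
--                   'handle<data_pipe_producer>': 'h:d:p',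
--                   'handle<message_pipe>': 'h:m'}
--   if kind.endswith('[]'):
--     return 'a:' + MapKind(kind[0:len(kind)-2])
--   if kind in map_to_kind:
--     return map_to_kind[kind]
--   return 'x:' + kind
-- ===== SOURCE B (Python) =====
-- def MapKind(kind):
--   map_to_kind = { 'bool': 'b',
--                   'int8': 'i8',
--                   'int16': 'i16',
--                   'int32': 'i32',
--                   'int64': 'i64',
--                   'uint8': 'u8',
--                   'uint16': 'u16',
--                   'uint32': 'u32',
--                   'uint64': 'u64',
--                   'float': 'f',
--                   'double': 'd',
--                   'string': 's',
--                   'handle': 'h',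
--                   'handle<data_pipe_consumer>': 'h:d:c',
--                   'handle<data_pipe_producer>': 'h:d:p',
--                   'handle<message_pipe>': 'h:m'}
--   count = 0
--   while kind.endswith('[]'):
--     count += 1
--     kind = kind[:-2]
--   return 'a:' * count + map_to_kind.get(kind, 'x:' + kind)
-- ===== Notes on version B (the rewrite author's own statement) =====
-- stated objective: idiomatic
-- what changed: Recursion replaced by an iterative loop that counts and strips trailing array-bracket pairs, followed by a single dict lookup with a fallback default and a repeated prefix built once.
import Mathlib
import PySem

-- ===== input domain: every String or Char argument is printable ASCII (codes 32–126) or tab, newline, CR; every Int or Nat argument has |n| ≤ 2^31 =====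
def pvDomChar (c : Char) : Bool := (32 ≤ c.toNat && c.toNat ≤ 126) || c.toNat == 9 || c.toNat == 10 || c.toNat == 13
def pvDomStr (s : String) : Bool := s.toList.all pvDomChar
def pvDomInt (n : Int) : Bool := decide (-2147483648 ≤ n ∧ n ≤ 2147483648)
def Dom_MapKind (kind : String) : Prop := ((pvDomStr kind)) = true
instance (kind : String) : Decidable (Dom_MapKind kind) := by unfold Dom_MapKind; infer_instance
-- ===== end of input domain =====

-- B replaces A's recursion by a loop counting trailing '[]' pairs, then one dict lookup; same cost (objective: idiomatic).

-- ===== PORT A =====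
-- the dict literal of both Pythons (identical contents in A and B)
def mapTable : PySem.Dict (List Char) (List Char) :=
  PySem.Dict.ofList [("bool".toList, "b".toList), ("int8".toList, "i8".toList), ("int16".toList, "i16".toList),
   ("int32".toList, "i32".toList), ("int64".toList, "i64".toList), ("uint8".toList, "u8".toList),
   ("uint16".toList, "u16".toList), ("uint32".toList, "u32".toList), ("uint64".toList, "u64".toList),
   ("float".toList, "f".toList), ("double".toList, "d".toList), ("string".toList, "s".toList),
   ("handle".toList, "h".toList), ("handle<data_pipe_consumer>".toList, "h:d:c".toList),
   ("handle<data_pipe_producer>".toList, "h:d:p".toList), ("handle<message_pipe>".toList, "h:m".toList)]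

-- termination helper for the recursive A: a string ending in "[]" has length ≥ 2,
-- and kind[0:len(kind)-2] is two shorter
theorem sliceA_len_lt (kind : List Char) (h : PySem.Chars.endswith kind "[]".toList = true) :
    (PySem.Chars.slice kind (some 0) (some ((kind.length : Int) - 2))).length < kind.length := by
  have h2 : 2 ≤ kind.length := by
    have := (PySem.Chars.endswith_iff kind "[]".toList).mp h
    have := List.IsSuffix.length_le this
    simpa using this
  have e : ((kind.length : Int) - 2) = ((kind.length - 2 : Nat) : Int) := by omega
  simp [PySem.Chars.slice_eq_listSlice, e, PySem.List.slice_to_natCast]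
  omega

-- literal port of A: recursion on kind
def MapKindCore (kind : List Char) : List Char :=
  if h : PySem.Chars.endswith kind "[]".toList = true then
    "a:".toList ++ MapKindCore (PySem.Chars.slice kind (some 0) (some ((kind.length : Int) - 2)))
  else
    match PySem.Dict.get? mapTable kind with   -- 'if kind in map_to_kind: return map_to_kind[kind]'
    | some v => v
    | none => "x:".toList ++ kind              -- "return 'x:' + kind"
termination_by kind.length
decreasing_by exact sliceA_len_lt kind h

def MapKind (kind : String) : String := String.ofList (MapKindCore kind.toList)

-- ===== PORT B =====
-- the while loop: strips trailing '[]' pairs (kind = kind[:-2]) counting them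
def stripArr (kind : List Char) (count : Nat) : List Char × Nat :=
  if _h : PySem.Chars.endswith kind "[]".toList = true then
    stripArr (PySem.List.slice kind none (some (-2))) (count + 1)
  else
    (kind, count)
termination_by kind.length
decreasing_by
  have h2 : 2 ≤ kind.length := by
    have := (PySem.Chars.endswith_iff kind "[]".toList).mp _h
    have := List.IsSuffix.length_le this
    simpa using this
  rw [PySem.List.slice_to_neg_ofNat kind 2 (by omega)]
  simp
  omega

def MapKind_alt (kind : String) : String :=
  let r := stripArr kind.toList 0
  -- 'a:' * count + map_to_kind.get(kind, 'x:' + kind)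
  String.ofList ((List.replicate r.2 "a:".toList).flatten ++
    PySem.Dict.getD mapTable r.1 ("x:".toList ++ r.1))

-- ===== PRECONDITION & SPEC =====
def Spec_MapKind (kind : String) (out : String) : Prop := out = MapKind_alt kind
instance (kind : String) (out : String) : Decidable (Spec_MapKind kind out) := by unfold Spec_MapKind; infer_instance

-- ===== CLAIM (what is proved, stated in full; the proofs are below) =====
def Claim_equal_MapKind : Prop := ∀ (kind : String), Dom_MapKind kind → Spec_MapKind kind (MapKind kind)

-- ===== LEMMAS AND PROOFS =====

-- both versions' slices strip the same two trailing characters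
theorem sliceA_eq (kind : List Char) (h2 : 2 ≤ kind.length) :
    PySem.Chars.slice kind (some 0) (some ((kind.length : Int) - 2)) =
      PySem.List.slice kind none (some (-2)) := by
  rw [PySem.List.slice_to_neg_ofNat kind 2 (by omega)]
  have e : ((kind.length : Int) - 2) = ((kind.length - 2 : Nat) : Int) := by omega
  simp [PySem.Chars.slice_eq_listSlice, e, PySem.List.slice_to_natCast]

-- the loop invariant: the assembled result of the loop equals count copies of 'a:' before A's value
theorem strip_spec (kind : List Char) (count : Nat) :
    (List.replicate (stripArr kind count).2 "a:".toList).flatten ++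
        PySem.Dict.getD mapTable (stripArr kind count).1 ("x:".toList ++ (stripArr kind count).1) =
      (List.replicate count "a:".toList).flatten ++ MapKindCore kind := by
  fun_induction stripArr kind count with
  | case1 kind count h ih =>
    have h2 : 2 ≤ kind.length := by
      have := List.IsSuffix.length_le ((PySem.Chars.endswith_iff kind "[]".toList).mp h)
      simpa using this
    rw [MapKindCore]
    simp only [h, ← sliceA_eq kind h2] at *
    rw [ih]
    simp [List.replicate_succ']
  | case2 kind count h =>
    rw [MapKindCore]
    simp only [h]
    simp [PySem.Dict.getD]
    cases PySem.Dict.get? mapTable kind <;> simp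

-- ===== VERDICT (by name: the statement is the Claim_ definition above) =====
theorem MapKind_spec : Claim_equal_MapKind := by
  intro kind _
  unfold Spec_MapKind MapKind MapKind_alt
  have := strip_spec kind.toList 0
  simp at this
  simp [this]
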